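-- pv_equiv track=rewrite | github.com/sleepypillowz/school-code | STI/3rd year/2nd sem/Info Assurance/cipher/keyword.py | keyword_cipher
-- ===== SOURCE A (Python) =====
-- def create_keyword_alphabet(keyword):
--     alphabet = "abcdefghijklmnopqrstuvwxyz"
--     seen = set()
--     substitution = ""
--
--     # Add unique letters from the keyword
--     for char in keyword:
--         if char not in seen and char in alphabet:
--             seen.add(char)
--             substitution += char
--
--     # Add the remaining letters of the alphabet
--     for char in alphabet:
--         if char not in seen:
--             substitution += char
--
--     return substitution
--
-- def keyword_cipher(text, keyword):
--     substitution = create_keyword_alphabet(keyword)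
--     alphabet = "abcdefghijklmnopqrstuvwxyz"
--     encrypted_text = ""
--
--     for char in text.lower():
--         if char in alphabet:
--             index = alphabet.index(char)
--             encrypted_text += substitution[index]
--         else:
--             encrypted_text += char  # Non-alphabet characters remain unchanged
--
--     return encrypted_text
-- ===== SOURCE B (Python) =====
-- def keyword_cipher(text, keyword):
--     alphabet = "abcdefghijklmnopqrstuvwxyz"
--     key = "".join(dict.fromkeys(c for c in keyword if c in alphabet))
--     rest = "".join(c for c in alphabet if c not in key)
--     s = text.lower()
--     # staged rewriting: 26 whole-text replace passes, routing through UPPERCASE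
--     # markers (absent from the lowered text) so no letter is substituted twice,
--     # then one final lower() turns the markers into the cipher letters.
--     for p, c in zip(alphabet, key + rest):
--         s = s.replace(p, c.upper())
--     return s.lower()
-- ===== Notes on version B (the rewrite author's own statement) =====
-- stated objective: alternative
-- what changed: Replaces the per-character alphabet.index lookup loop with staged whole-text rewriting: 26 str.replace passes that map each plaintext letter to an UPPERCASE cipher marker (impossible to re-substitute since the text was lowered first), followed by one final lower() that turns the markers into the cipher letters; the keyword alphabet is built by ordered dedup (dict.fromkeys) plus a filter instead of a seen-set accumulation loop.
import Mathlib
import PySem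

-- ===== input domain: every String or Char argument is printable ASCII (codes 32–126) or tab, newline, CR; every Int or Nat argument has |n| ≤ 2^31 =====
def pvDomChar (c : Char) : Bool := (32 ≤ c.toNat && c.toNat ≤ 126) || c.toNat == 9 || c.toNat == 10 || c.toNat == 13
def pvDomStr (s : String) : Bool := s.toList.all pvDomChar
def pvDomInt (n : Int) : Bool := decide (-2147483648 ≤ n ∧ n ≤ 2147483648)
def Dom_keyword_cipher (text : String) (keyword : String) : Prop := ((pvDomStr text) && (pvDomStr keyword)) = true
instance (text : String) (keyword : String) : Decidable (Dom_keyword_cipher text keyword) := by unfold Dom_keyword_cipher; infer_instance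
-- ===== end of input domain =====

-- B encrypts by 26 staged whole-text replace passes through uppercase markers (then a final
-- lower) instead of A's per-character alphabet.index loop; same cost class (alternative).

-- ===== PORT A =====
def create_keyword_alphabet (keyword : String) : List Char :=
  let alphabet := "abcdefghijklmnopqrstuvwxyz".toList
  let p := keyword.toList.foldl
    (fun (p : PySem.Set Char × List Char) c =>
      if !(PySem.Set.contains p.1 c) && alphabet.contains c then
        (PySem.Set.add p.1 c, p.2 ++ [c])
      else p)
    (PySem.Set.empty, [])
  alphabet.foldl (fun sub c => if !(PySem.Set.contains p.1 c) then sub ++ [c] else sub) p.2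

def keyword_cipher (text : String) (keyword : String) : String :=
  let substitution := create_keyword_alphabet keyword
  let alphabet := "abcdefghijklmnopqrstuvwxyz".toList
  String.mk ((PySem.Str.lower text).toList.foldl
    (fun acc c =>
      if alphabet.contains c then
        match PySem.List.index? alphabet c with
        | some index => acc ++ [PySem.List.pyGetD substitution (index : Int) c]
        | none => acc
      else acc ++ [c])
    [])

-- ===== PORT B =====
def keyword_cipher_alt (text : String) (keyword : String) : String :=
  let alphabet := "abcdefghijklmnopqrstuvwxyz".toList
  let key := PySem.List.dedup (keyword.toList.filter (fun c => alphabet.contains c))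
  let rest := alphabet.filter (fun c => !(key.contains c))
  let s0 := (PySem.Str.lower text).toList
  let s := (alphabet.zip (key ++ rest)).foldl
    (fun s pc => PySem.Chars.replace s [pc.1] [PySem.Chars.upperChar pc.2]) s0
  String.mk (PySem.Chars.lower s)

-- ===== PRECONDITION & SPEC =====
def Spec_keyword_cipher (text : String) (keyword : String) (out : String) : Prop := out = keyword_cipher_alt text keyword
instance (text : String) (keyword : String) (out : String) : Decidable (Spec_keyword_cipher text keyword out) := by unfold Spec_keyword_cipher; infer_instance

-- ===== CLAIM (what is proved, stated in full; the proofs are below) =====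
def Claim_equal_keyword_cipher : Prop := ∀ (text : String) (keyword : String), Dom_keyword_cipher text keyword → Spec_keyword_cipher text keyword (keyword_cipher text keyword)

-- ===== LEMMAS AND PROOFS =====
def alphaL : List Char := "abcdefghijklmnopqrstuvwxyz".toList

-- B's substitution alphabet (keyword letters first-seen, then the rest)
def subB (keyword : String) : List Char :=
  let keyLetters := PySem.List.dedup (keyword.toList.filter (fun c => alphaL.contains c))
  keyLetters ++ alphaL.filter (fun c => !(keyLetters.contains c))

-- A's per-character substitution function
def fA (sub : List Char) (c : Char) : Char :=
  if alphaL.contains c then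
    match PySem.List.index? alphaL c with
    | some i => PySem.List.pyGetD sub (i : Int) c
    | none => c
  else c

-- ---------- A's keyword-alphabet loop equals B's dedup+filter construction ----------
theorem loopA_eq_update (alphabet : List Char) (l : List Char) (s : PySem.Set Char) :
    l.foldl
      (fun (p : PySem.Set Char × List Char) c =>
        if !(PySem.Set.contains p.1 c) && alphabet.contains c then
          (PySem.Set.add p.1 c, p.2 ++ [c])
        else p)
      (s, s)
    = (PySem.Set.update s (l.filter (fun c => alphabet.contains c)),
       PySem.Set.update s (l.filter (fun c => alphabet.contains c))) := by
  induction l generalizing s with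
  | nil => rfl
  | cons c l ih =>
    simp only [List.foldl_cons, List.filter_cons]
    by_cases hc : c ∈ alphabet
    · have hcb : alphabet.contains c = true := by simpa using hc
      by_cases hm : c ∈ s
      · have hadd : PySem.Set.add s c = s := by simp [PySem.Set.add, hm]
        simpa [hm, hc, hadd, PySem.Set.update] using ih s
      · have hadd : PySem.Set.add s c = s ++ [c] := by simp [PySem.Set.add, hm]
        simpa [hm, hc, hadd, PySem.Set.update] using ih (s ++ [c])
    · simpa [hc] using ih s

theorem subA_eq_subB (keyword : String) : create_keyword_alphabet keyword = subB keyword := by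
  have e : create_keyword_alphabet keyword =
      alphaL.foldl
        (fun sub c =>
          if !(PySem.Set.contains
                (keyword.toList.foldl
                  (fun (p : PySem.Set Char × List Char) c =>
                    if !(PySem.Set.contains p.1 c) && alphaL.contains c then
                      (PySem.Set.add p.1 c, p.2 ++ [c])
                    else p)
                  (PySem.Set.empty, PySem.Set.empty)).1 c)
          then sub ++ [c] else sub)
        (keyword.toList.foldl
          (fun (p : PySem.Set Char × List Char) c =>
            if !(PySem.Set.contains p.1 c) && alphaL.contains c then
              (PySem.Set.add p.1 c, p.2 ++ [c])
            else p)
          (PySem.Set.empty, PySem.Set.empty)).2 := rfl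
  rw [e, loopA_eq_update alphaL keyword.toList PySem.Set.empty]
  rw [PySem.List.foldl_append_if_eq_filter
    (fun c => !(PySem.Set.contains (PySem.Set.update PySem.Set.empty (keyword.toList.filter (fun c => alphaL.contains c))) c))]
  simp [subB, PySem.List.dedup_eq_ofList, PySem.Set.update_nil_left, PySem.Set.empty]

theorem length_filter_split (p : Char → Bool) (l : List Char) :
    (l.filter p).length + (l.filter (fun c => !(p c))).length = l.length := by
  induction l with
  | nil => rfl
  | cons c l ih =>
    by_cases h : p c = true <;> simp [h, ← ih] <;> omega

theorem length_subB (keyword : String) : (subB keyword).length = alphaL.length := by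
  have hn : alphaL.Nodup := by decide
  unfold subB
  set S := PySem.List.dedup (keyword.toList.filter (fun c => alphaL.contains c)) with hS
  have hsub : ∀ x ∈ S, x ∈ alphaL := by
    intro x hx
    rw [hS, PySem.List.mem_dedup] at hx
    simpa using List.of_mem_filter hx
  have hnd : S.Nodup := by rw [hS]; exact PySem.List.nodup_dedup _
  have hperm : (alphaL.filter (fun c => S.contains c)).Perm S := by
    rw [List.perm_ext_iff_of_nodup (List.Nodup.filter _ hn) hnd]
    intro a
    constructor
    · intro h
      simpa using (List.mem_filter.mp h).2
    · intro h
      exact List.mem_filter.mpr ⟨hsub a h, by simpa using h⟩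
  have hlen : (alphaL.filter (fun c => S.contains c)).length = S.length := hperm.length_eq
  have := length_filter_split (fun c => S.contains c) alphaL
  simp only [List.length_append]
  omega

theorem mem_subB (keyword : String) (x : Char) (hx : x ∈ subB keyword) : x ∈ alphaL := by
  unfold subB at hx
  rcases List.mem_append.mp hx with h | h
  · rw [PySem.List.mem_dedup] at h
    simpa using List.of_mem_filter h
  · exact List.mem_filter.mp h |>.1

-- ---------- A's encryption fold is a map with fA ----------
theorem foldA_eq_map (sub : List Char) (l acc : List Char) :
    l.foldl
      (fun acc c =>
        if alphaL.contains c then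
          match PySem.List.index? alphaL c with
          | some index => acc ++ [PySem.List.pyGetD sub (index : Int) c]
          | none => acc
        else acc ++ [c])
      acc
    = acc ++ l.map (fA sub) := by
  induction l generalizing acc with
  | nil => simp
  | cons c l ih =>
    rw [List.foldl_cons, List.map_cons, ih]
    have hg : (if alphaL.contains c then
          match PySem.List.index? alphaL c with
          | some index => acc ++ [PySem.List.pyGetD sub (index : Int) c]
          | none => acc
        else acc ++ [c]) = acc ++ [fA sub c] := by
      unfold fA
      by_cases hc : alphaL.contains c = true
      · cases hi : PySem.List.index? alphaL c with
        | none => exact absurd ((PySem.List.index?_eq_none_iff _ _).mp hi) (by simpa using hc)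
        | some i =>
          have hm : c ∈ alphaL := by simpa using hc
          simp [hm]
      · have hm : c ∉ alphaL := by simpa using hc
        simp [hm]
    rw [hg, List.append_assoc, List.singleton_append]

-- ---------- single-char replace is a character map ----------
theorem go_single (p q : Char) : ∀ (l : List Char) (fuel : Nat) (acc : List Char),
    l.length ≤ fuel →
    PySem.Chars.replace.go [p] [q] fuel l acc
      = acc.reverse ++ l.map (fun c => if c = p then q else c) := by
  intro l
  induction l with
  | nil =>
    intro fuel acc _
    cases fuel <;> simp [PySem.Chars.replace.go]
  | cons c t ih =>
    intro fuel acc hf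
    cases fuel with
    | zero => simp at hf
    | succ f =>
      rw [PySem.Chars.replace.go]
      by_cases h : c = p
      · subst h
        have hp : [c].isPrefixOf (c :: t) = true := by simp [List.isPrefixOf]
        rw [if_pos hp]
        simp only [List.length_cons] at hf
        simp only [List.length_singleton, List.drop_one, List.tail_cons, List.reverse_singleton]
        rw [ih _ _ (by omega)]
        simp
      · have hp : [p].isPrefixOf (c :: t) = false := by
          simp [List.isPrefixOf, Ne.symm h]
        rw [if_neg (by simp [hp])]
        simp only [List.length_cons] at hf
        rw [ih _ _ (by omega)]
        simp [h]

theorem replace_single (l : List Char) (p q : Char) :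
    PySem.Chars.replace l [p] [q] = l.map (fun c => if c = p then q else c) := by
  rw [PySem.Chars.replace]
  simp only [List.isEmpty_cons, Bool.false_eq_true, if_false]
  rw [go_single p q l l.length [] le_rfl]
  simp

-- ---------- a fold of per-char maps is one map of the folded char function ----------
theorem foldl_replace_eq_map (ps : List (Char × Char)) (s : List Char) :
    ps.foldl (fun s pc => PySem.Chars.replace s [pc.1] [PySem.Chars.upperChar pc.2]) s
    = s.map (fun c => ps.foldl (fun x pc => if x = pc.1 then PySem.Chars.upperChar pc.2 else x) c) := by
  induction ps generalizing s with
  | nil => simp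
  | cons pc ps ih =>
    simp only [List.foldl_cons]
    rw [replace_single, ih, List.map_map]
    rfl

-- ---------- evaluating the chained per-char substitutions ----------
theorem chain_fixed (ps : List (Char × Char)) (x : Char)
    (h : ∀ pc ∈ ps, pc.1 ≠ x) :
    ps.foldl (fun x pc => if x = pc.1 then PySem.Chars.upperChar pc.2 else x) x = x := by
  induction ps with
  | nil => rfl
  | cons pc ps ih =>
    simp only [List.foldl_cons]
    rw [if_neg (Ne.symm (h pc List.mem_cons_self))]
    exact ih (fun p hp => h p (List.mem_cons_of_mem _ hp))

theorem chain_eval (keys : List Char) : ∀ (vals : List Char) (c : Char),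
    keys.length ≤ vals.length →
    (∀ k ∈ keys, ∀ v ∈ vals, PySem.Chars.upperChar v ≠ k) →
    (keys.zip vals).foldl (fun x pc => if x = pc.1 then PySem.Chars.upperChar pc.2 else x) c
    = match PySem.List.index? keys c with
      | some i => PySem.Chars.upperChar (vals.getD i c)
      | none => c := by
  induction keys with
  | nil => intro vals c _ _; simp [PySem.List.index?]
  | cons k ks ih =>
    intro vals c hlen H
    cases vals with
    | nil => simp at hlen
    | cons v vs =>
      simp only [List.zip_cons_cons, List.foldl_cons]
      by_cases hck : c = k
      · subst hck
        rw [PySem.List.index?_cons_self, if_pos rfl]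
        rw [chain_fixed]
        · simp
        · intro pc hpc
          rcases List.of_mem_zip hpc with ⟨h1, _⟩
          exact Ne.symm (H pc.1 (List.mem_cons_of_mem _ h1) v List.mem_cons_self)
      · rw [if_neg hck, PySem.List.index?_cons_of_ne ks (Ne.symm hck)]
        rw [ih vs c (by simpa using hlen)
          (fun k' hk' v' hv' => H k' (List.mem_cons_of_mem _ hk') v' (List.mem_cons_of_mem _ hv'))]
        cases PySem.List.index? ks c <;> simp

-- ---------- character facts ----------
theorem char_le_iff (a b : Char) : a ≤ b ↔ a.toNat ≤ b.toNat := by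
  rw [Char.le_def, UInt32.le_iff_toNat_le]; rfl

theorem notupper_lowerChar (x : Char) :
    PySem.Chars.isupper (PySem.Chars.lowerChar x) = false := by
  by_cases h : PySem.Chars.isupper x = true
  · have h1 : 65 ≤ x.toNat ∧ x.toNat ≤ 90 := by
      simp only [PySem.Chars.isupper, Bool.and_eq_true, decide_eq_true_eq, char_le_iff] at h
      exact h
    have e : PySem.Chars.lowerChar x = Char.ofNat (x.toNat + 32) := by
      simp [PySem.Chars.lowerChar, h]
    have hv : (x.toNat + 32).isValidChar := by left; omega
    have ht : (Char.ofNat (x.toNat + 32)).toNat = x.toNat + 32 := by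
      rw [Char.toNat_ofNat, if_pos hv]
    rw [e]
    have hz : ¬ (Char.ofNat (x.toNat + 32) ≤ 'Z') := by
      rw [char_le_iff, ht]
      show ¬ (x.toNat + 32 ≤ 90)
      omega
    simp [PySem.Chars.isupper, hz]
  · have e : PySem.Chars.lowerChar x = x := by simp [PySem.Chars.lowerChar, h]
    rw [e]
    simpa using h

theorem lowerChar_of_notupper (x : Char) (h : PySem.Chars.isupper x = false) :
    PySem.Chars.lowerChar x = x := by
  simp [PySem.Chars.lowerChar, h]

theorem round_alpha : ∀ v ∈ alphaL, PySem.Chars.lowerChar (PySem.Chars.upperChar v) = v := by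
  have h : alphaL.all
      (fun v => PySem.Chars.lowerChar (PySem.Chars.upperChar v) == v) = true := by decide
  intro v hv
  exact eq_of_beq (List.all_eq_true.mp h v hv)

theorem up_ne_alpha : ∀ v ∈ alphaL, ∀ k ∈ alphaL, PySem.Chars.upperChar v ≠ k := by
  have h : alphaL.all
      (fun v => alphaL.all (fun k => PySem.Chars.upperChar v != k)) = true := by decide
  intro v hv k hk
  have := List.all_eq_true.mp (List.all_eq_true.mp h v hv) k hk
  simpa using this

-- ---------- the pointwise equality on non-uppercase characters ----------
theorem pointwise (keyword : String) (c : Char) (hc : PySem.Chars.isupper c = false) :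
    PySem.Chars.lowerChar
      ((alphaL.zip (subB keyword)).foldl
        (fun x pc => if x = pc.1 then PySem.Chars.upperChar pc.2 else x) c)
    = fA (subB keyword) c := by
  have hlen : alphaL.length ≤ (subB keyword).length := le_of_eq (length_subB keyword).symm
  have H : ∀ k ∈ alphaL, ∀ v ∈ subB keyword, PySem.Chars.upperChar v ≠ k :=
    fun k hk v hv => up_ne_alpha v (mem_subB keyword v hv) k hk
  rw [chain_eval alphaL (subB keyword) c hlen H]
  unfold fA
  cases hi : PySem.List.index? alphaL c with
  | none =>
    have hm : c ∉ alphaL := (PySem.List.index?_eq_none_iff _ _).mp hi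
    simp [hm, lowerChar_of_notupper c hc]
  | some i =>
    rw [PySem.List.index?_eq_idxOf?] at hi
    obtain ⟨hilt, hgi, _⟩ := List.idxOf?_eq_some_iff.mp hi
    have hm : alphaL.contains c = true := by
      simp only [List.contains_iff_mem]
      exact hgi ▸ List.getElem_mem hilt
    have hilt' : i < (subB keyword).length := by
      rw [length_subB]; exact hilt
    have hgd : (subB keyword).getD i c = (subB keyword)[i] := List.getD_eq_getElem _ _ hilt'
    simp only [hm, if_true]
    rw [hgd, round_alpha _ (mem_subB keyword _ (List.getElem_mem hilt')), PySem.List.pyGetD_natCast, hgd]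

-- ===== VERDICT (by name: the statement is the Claim_ definition above) =====
theorem keyword_cipher_spec : Claim_equal_keyword_cipher := by
  intro text keyword _
  show keyword_cipher text keyword = keyword_cipher_alt text keyword
  have eA : keyword_cipher text keyword =
      String.mk (((PySem.Str.lower text).toList).map (fA (subB keyword))) := by
    show String.mk ((PySem.Str.lower text).toList.foldl
      (fun acc c =>
        if alphaL.contains c then
          match PySem.List.index? alphaL c with
          | some index => acc ++ [PySem.List.pyGetD (create_keyword_alphabet keyword) (index : Int) c]
          | none => acc
        else acc ++ [c]) []) = _
    rw [subA_eq_subB, foldA_eq_map, List.nil_append]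
  have eB : keyword_cipher_alt text keyword =
      String.mk (PySem.Chars.lower
        ((alphaL.zip (subB keyword)).foldl
          (fun s pc => PySem.Chars.replace s [pc.1] [PySem.Chars.upperChar pc.2])
          ((PySem.Str.lower text).toList))) := rfl
  rw [eA, eB, foldl_replace_eq_map]
  unfold PySem.Chars.lower
  rw [List.map_map]
  congr 1
  have hl : (PySem.Str.lower text).toList = text.toList.map PySem.Chars.lowerChar := by
    simp [PySem.Chars.lower]
  rw [hl, List.map_map, List.map_map]
  apply List.map_congr_left
  intro x _
  simp only [Function.comp_apply]
  exact (pointwise keyword (PySem.Chars.lowerChar x) (notupper_lowerChar x)).symm
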